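-- pv_equiv track=rewrite | github.com/pypi-data/pypi-mirror-139 | packages/definedfunctions/definedfunctions-0.2-py3-none-any.whl/definedfunctions/__init__.py | strong_range
-- ===== SOURCE A (Python) =====
-- def strong_range(start,end):
--     a=start
--     b=end
--     e=[]
--     for n in range(a,b+1):
--         st=0
--         for i in str(n):
--             p=1
--             for i in range(1,int(i)+1):
--                 p=p*i
--             st=st+p
--         if (st==n):
--             e.append(n)
--     return e
-- ===== SOURCE B (Python) =====
-- _FACT = (1, 1, 2, 6, 24, 120, 720, 5040, 40320, 362880)
--
-- def strong_range(start, end):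
--     out = []
--     for n in range(start, end + 1):
--         s = 1 if n == 0 else 0  # 0 has the single digit '0', whose factorial is 1
--         m = n
--         while m > 0:
--             s += _FACT[m % 10]
--             m //= 10
--         if s == n:
--             out.append(n)
--     return out
-- ===== Notes on version B (the rewrite author's own statement) =====
-- stated objective: faster
-- what changed: B replaces A's per-number string conversion with char-to-int parsing and an inner factorial loop per digit by arithmetic digit extraction (mod/floordiv 10) with a precomputed table of the ten digit factorials.
import Mathlib
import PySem

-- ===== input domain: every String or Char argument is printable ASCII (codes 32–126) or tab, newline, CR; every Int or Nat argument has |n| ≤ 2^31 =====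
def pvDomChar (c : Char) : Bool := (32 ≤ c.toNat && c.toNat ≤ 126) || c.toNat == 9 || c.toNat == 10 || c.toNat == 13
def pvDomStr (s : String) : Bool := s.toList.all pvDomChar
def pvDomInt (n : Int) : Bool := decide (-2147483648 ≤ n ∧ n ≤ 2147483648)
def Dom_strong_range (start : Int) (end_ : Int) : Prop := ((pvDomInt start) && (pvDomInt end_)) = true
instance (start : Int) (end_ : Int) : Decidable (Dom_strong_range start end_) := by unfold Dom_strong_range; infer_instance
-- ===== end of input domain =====

-- B replaces A's str(n)/int(char) digit handling and inner factorial loop by arithmetic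
-- digit extraction (mod/floordiv 10) with a precomputed table of the ten digit factorials;
-- measurably faster by a constant factor.


-- ===== PORT A =====
-- st = st + p for the char c: p = factorial of int(c) computed by A's inner loop over range(1, int(c)+1).
-- int(c) is ported as (PySem.Int.ofChars? [c]).getD 0; Python raises ValueError when c is not a digit
-- (only reachable for negative n via the '-' sign char), which Pre_strong_range excludes.
def pvStepA (st : Int) (c : Char) : Int :=
  st + (PySem.List.pyRange 1 ((PySem.Int.ofChars? [c]).getD 0 + 1) 1).foldl (fun p i => p * i) 1

def strong_range (start : Int) (end_ : Int) : List Int :=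
  (PySem.List.pyRange start (end_ + 1) 1).foldl (fun e n =>
    let st := (PySem.Int.toChars n).foldl pvStepA 0
    if st = n then e ++ [n] else e) []

-- ===== PORT B =====
def pvFact : List Int := [1, 1, 2, 6, 24, 120, 720, 5040, 40320, 362880]

-- the 'while m > 0' loop of Source B; fuel (= the initial m) only makes the recursion structural,
-- it never runs out since m/10 < m for m > 0
def pvFactLoop (fuel : Nat) (m : Nat) (s : Int) : Int :=
  match fuel with
  | 0 => s
  | fuel + 1 => if m = 0 then s else pvFactLoop fuel (m / 10) (s + pvFact.getD (m % 10) 0)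

def strong_range_alt (start : Int) (end_ : Int) : List Int :=
  (PySem.List.pyRange start (end_ + 1) 1).foldl (fun out n =>
    let s := pvFactLoop n.toNat n.toNat (if n = 0 then 1 else 0)
    if s = n then out ++ [n] else out) []

-- ===== PRECONDITION & SPEC =====
-- Pre_ excludes exactly the inputs where the iterated range contains a negative number
-- (start < 0 and start ≤ end): there A raises ValueError on int('-').
def Pre_strong_range (start : Int) (end_ : Int) : Prop := 0 ≤ start ∨ end_ < start
instance (start : Int) (end_ : Int) : Decidable (Pre_strong_range start end_) := by
  unfold Pre_strong_range; infer_instance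

def pvWitness_strong_range : Int × Int := (0, 200)

def Spec_strong_range (start : Int) (end_ : Int) (out : List Int) : Prop :=
  out = strong_range_alt start end_
instance (start : Int) (end_ : Int) (out : List Int) : Decidable (Spec_strong_range start end_ out) := by
  unfold Spec_strong_range; infer_instance

-- ===== CLAIM (what is proved, stated in full; the proofs are below) =====
def Claim_equal_strong_range : Prop := ∀ (start : Int) (end_ : Int), Dom_strong_range start end_ → Pre_strong_range start end_ → Spec_strong_range start end_ (strong_range start end_)

-- ===== LEMMAS AND PROOFS =====

-- digit-factorial sum over Nat.digits, the common reference point of both sides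
def pvDSum (m : Nat) : Int := ((Nat.digits 10 m).map (fun d => pvFact.getD d 0)).sum

theorem pvFactLoop_eq_dsum (fuel m : Nat) (s : Int) (h : m ≤ fuel) :
    pvFactLoop fuel m s = s + pvDSum m := by
  induction fuel generalizing m s with
  | zero =>
    interval_cases m
    simp [pvFactLoop, pvDSum]
  | succ fuel ih =>
    by_cases hm : m = 0
    · simp [pvFactLoop, hm, pvDSum]
    · have hlt : m / 10 ≤ fuel := by omega
      rw [pvFactLoop, if_neg hm, ih _ _ hlt]
      have hd : Nat.digits 10 m = m % 10 :: Nat.digits 10 (m / 10) :=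
        Nat.digits_def' (by norm_num) (Nat.pos_of_ne_zero hm)
      simp [pvDSum, hd]
      ring

theorem pvFoldl_stepA (xs : List Char) (st : Int) :
    xs.foldl pvStepA st =
      st + (xs.map (fun c =>
        (PySem.List.pyRange 1 ((PySem.Int.ofChars? [c]).getD 0 + 1) 1).foldl (fun p i => p * i) 1)).sum := by
  induction xs generalizing st with
  | nil => simp
  | cons c cs ih => simp [pvStepA, ih]; ring

theorem pvToDigitsCore_eq (fuel : Nat) :
    ∀ (n : Nat) (ds : List Char), 0 < n → n ≤ fuel →
      Nat.toDigitsCore 10 fuel n ds = ((Nat.digits 10 n).map Nat.digitChar).reverse ++ ds := by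
  induction fuel with
  | zero => intro n ds h1 h2; omega
  | succ fuel ih =>
    intro n ds h1 h2
    have hd : Nat.digits 10 n = n % 10 :: Nat.digits 10 (n / 10) :=
      Nat.digits_def' (by norm_num) h1
    rw [Nat.toDigitsCore]
    by_cases hz : n / 10 = 0
    · rw [if_pos hz, hd, hz]
      simp
    · rw [if_neg hz, ih (n / 10) _ (Nat.pos_of_ne_zero hz) (by omega), hd]
      simp

theorem pvToDigits_eq (n : Nat) (h : 0 < n) :
    Nat.toDigits 10 n = ((Nat.digits 10 n).map Nat.digitChar).reverse := by
  have := pvToDigitsCore_eq (n + 1) n [] h (by omega)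
  simpa [Nat.toDigits] using this

-- per digit d < 10: A's inner factorial loop on the char digitChar d equals the table entry
theorem pvDigit_fact (d : Nat) (h : d < 10) :
    (PySem.List.pyRange 1 ((PySem.Int.ofChars? [Nat.digitChar d]).getD 0 + 1) 1).foldl
      (fun p i => p * i) 1 = pvFact.getD d 0 := by
  interval_cases d <;> decide

-- the per-element core: for n ≥ 0 A's digit-factorial sum equals B's
theorem pvCore (n : Int) (h : 0 ≤ n) :
    (PySem.Int.toChars n).foldl pvStepA 0 =
      pvFactLoop n.toNat n.toNat (if n = 0 then 1 else 0) := by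
  by_cases hz : n = 0
  · subst hz; decide
  · have hpos : 0 < n.toNat := by omega
    have htc : PySem.Int.toChars n = Nat.toDigits 10 n.toNat := by
      simp [PySem.Int.toChars, not_lt.mpr h]
    rw [htc, pvToDigits_eq _ hpos, pvFoldl_stepA, if_neg hz,
        pvFactLoop_eq_dsum _ _ _ (le_refl _)]
    rw [List.map_reverse, List.sum_reverse, List.map_map]
    have hmap : (Nat.digits 10 n.toNat).map
        ((fun c => (PySem.List.pyRange 1 ((PySem.Int.ofChars? [c]).getD 0 + 1) 1).foldl
          (fun p i => p * i) 1) ∘ Nat.digitChar)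
        = (Nat.digits 10 n.toNat).map (fun d => pvFact.getD d 0) := by
      apply List.map_congr_left
      intro d hd
      exact pvDigit_fact d (Nat.digits_lt_base (by norm_num) hd)
    rw [hmap]
    simp [pvDSum]

-- ===== VERDICT (by name: the statement is the Claim_ definition above) =====
theorem strong_range_spec : Claim_equal_strong_range := by
  intro start end_ _ hpre
  unfold Spec_strong_range strong_range strong_range_alt
  apply PySem.List.foldl_congr_mem
  intro acc n hn
  have hn' := (PySem.List.mem_pyRange_one.mp hn).1
  have h0 : 0 ≤ n := by
    rcases hpre with h | h
    · omega
    · exfalso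
      have := (PySem.List.mem_pyRange_one.mp hn).2
      omega
  simp only [pvCore n h0]
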